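-- pv_equiv track=rewrite | github.com/alberthamoui/candidate_allocation | python/alocatePython.py | conflitante
-- ===== SOURCE A (Python) =====
-- from typing import Dict, List, Tuple, Optional
--
-- def conflitante(avIDs: List[int], pid: int,
--                 hard: Dict[int, Dict[int, bool]],
--                 soft: Dict[int, Dict[int, bool]]) -> Tuple[bool, bool]:
--     hardBlock = False
--     softTouch = False
--     for av in avIDs:
--         if hard.get(av, {}).get(pid, False):
--             return True, True
--         if soft.get(av, {}).get(pid, False):
--             softTouch = True
--     return hardBlock, softTouch
-- ===== SOURCE B (Python) =====
-- from typing import Dict, List, Tuple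
--
-- def conflitante(avIDs: List[int], pid: int,
--                 hard: Dict[int, Dict[int, bool]],
--                 soft: Dict[int, Dict[int, bool]]) -> Tuple[bool, bool]:
--     # Inverted traversal: walk the conflict dictionaries instead of the
--     # availability list, testing membership in a set of the availability IDs.
--     avs = set(avIDs)
--     for av, inner in hard.items():
--         if av in avs and inner.get(pid, False):
--             return True, True
--     for av, inner in soft.items():
--         if av in avs and inner.get(pid, False):
--             return False, True
--     return False, False
-- ===== Notes on version B (the rewrite author's own statement) =====
-- stated objective: alternative
-- what changed: Inverts the traversal: instead of scanning avIDs with nested dict lookups, B builds a set of avIDs once and iterates the hard and soft dictionaries' items, returning on the first entry whose key is in the set and whose inner dict marks pid; correct because both directions detect exactly the existence of such a pair.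
import Mathlib
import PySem

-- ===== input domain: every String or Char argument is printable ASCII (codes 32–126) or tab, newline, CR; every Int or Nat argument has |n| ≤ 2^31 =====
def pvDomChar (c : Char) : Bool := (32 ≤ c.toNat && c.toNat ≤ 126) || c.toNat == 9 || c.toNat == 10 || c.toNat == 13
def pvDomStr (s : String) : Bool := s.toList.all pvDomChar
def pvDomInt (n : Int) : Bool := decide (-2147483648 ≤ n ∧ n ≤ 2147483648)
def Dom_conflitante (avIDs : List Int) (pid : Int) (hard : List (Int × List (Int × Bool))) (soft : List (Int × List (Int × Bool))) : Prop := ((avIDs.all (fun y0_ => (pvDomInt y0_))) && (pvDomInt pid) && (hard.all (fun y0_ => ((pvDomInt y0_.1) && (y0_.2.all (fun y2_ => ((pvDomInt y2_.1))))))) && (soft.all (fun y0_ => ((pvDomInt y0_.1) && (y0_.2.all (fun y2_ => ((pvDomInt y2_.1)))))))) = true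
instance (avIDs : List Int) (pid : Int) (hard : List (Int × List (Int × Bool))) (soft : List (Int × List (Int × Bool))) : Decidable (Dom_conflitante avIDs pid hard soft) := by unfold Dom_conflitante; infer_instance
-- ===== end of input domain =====

-- B inverts the traversal (iterate the dicts against a set of avIDs) instead of A's scan of avIDs; same values everywhere, proved below.

-- ===== PORT A =====
-- hard.get(av, {}).get(pid, False) — two-level dict lookup with defaults
def pyGet2 (d : List (Int × List (Int × Bool))) (av pid : Int) : Bool :=
  (PySem.Dict.ofList ((PySem.Dict.ofList d).getD av [])).getD pid false

-- the for-loop of A, carrying the softTouch flag; early return on a hard conflict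
def conflitanteGo (pid : Int) (hard soft : List (Int × List (Int × Bool))) : List Int → Bool → Bool × Bool
  | [], softTouch => (false, softTouch)
  | av :: rest, softTouch =>
    if pyGet2 hard av pid then (true, true)
    else if pyGet2 soft av pid then conflitanteGo pid hard soft rest true
    else conflitanteGo pid hard soft rest softTouch

def conflitante (avIDs : List Int) (pid : Int) (hard : List (Int × List (Int × Bool))) (soft : List (Int × List (Int × Bool))) : Bool × Bool :=
  conflitanteGo pid hard soft avIDs false

-- ===== PORT B =====
-- one of B's dict scans: first items entry whose key is in avs and whose inner dict marks pid
def hitB (pid : Int) (avs : PySem.Set Int) : List (Int × List (Int × Bool)) → Bool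
  | [] => false
  | (av, inner) :: rest =>
    if PySem.Set.contains avs av && (PySem.Dict.ofList inner).getD pid false then true
    else hitB pid avs rest

def conflitante_alt (avIDs : List Int) (pid : Int) (hard : List (Int × List (Int × Bool))) (soft : List (Int × List (Int × Bool))) : Bool × Bool :=
  if hitB pid (PySem.Set.ofList avIDs) (PySem.Dict.ofList hard).items then (true, true)
  else if hitB pid (PySem.Set.ofList avIDs) (PySem.Dict.ofList soft).items then (false, true)
  else (false, false)

-- ===== PRECONDITION & SPEC =====
def Spec_conflitante (avIDs : List Int) (pid : Int) (hard : List (Int × List (Int × Bool))) (soft : List (Int × List (Int × Bool))) (out : Bool × Bool) : Prop := out = conflitante_alt avIDs pid hard soft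
instance (avIDs : List Int) (pid : Int) (hard : List (Int × List (Int × Bool))) (soft : List (Int × List (Int × Bool))) (out : Bool × Bool) : Decidable (Spec_conflitante avIDs pid hard soft out) := by unfold Spec_conflitante; infer_instance

-- ===== CLAIM (what is proved, stated in full; the proofs are below) =====
def Claim_equal_conflitante : Prop := ∀ (avIDs : List Int) (pid : Int) (hard : List (Int × List (Int × Bool))) (soft : List (Int × List (Int × Bool))), Dom_conflitante avIDs pid hard soft → Spec_conflitante avIDs pid hard soft (conflitante avIDs pid hard soft)

-- ===== LEMMAS AND PROOFS =====

-- A's loop, characterised: hard hit anywhere forces (true,true); otherwise the soft flag is an any.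
lemma conflitanteGo_eq (pid : Int) (hard soft : List (Int × List (Int × Bool)))
    (l : List Int) (st : Bool) :
    conflitanteGo pid hard soft l st =
      if l.any (fun av => pyGet2 hard av pid) then (true, true)
      else (false, st || l.any (fun av => pyGet2 soft av pid)) := by
  induction l generalizing st with
  | nil => simp [conflitanteGo]
  | cons av rest ih =>
    simp only [conflitanteGo, List.any_cons]
    by_cases h : pyGet2 hard av pid
    · simp [h]
    · by_cases h2 : pyGet2 soft av pid <;> simp [h, h2, ih]

lemma hitB_eq_any (pid : Int) (avs : PySem.Set Int) (l : List (Int × List (Int × Bool))) :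
    hitB pid avs l =
      l.any (fun p => PySem.Set.contains avs p.1 && (PySem.Dict.ofList p.2).getD pid false) := by
  induction l with
  | nil => rfl
  | cons p rest ih =>
    obtain ⟨av, inner⟩ := p
    by_cases h : PySem.Set.contains avs av && (PySem.Dict.ofList inner).getD pid false <;>
      simp [hitB, ih]

-- the inverted scan over a dict's items equals A's scan over avIDs
lemma hitB_eq (pid : Int) (avIDs : List Int) (d : List (Int × List (Int × Bool))) :
    hitB pid (PySem.Set.ofList avIDs) (PySem.Dict.ofList d).items =
      avIDs.any (fun av => pyGet2 d av pid) := by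
  rw [hitB_eq_any]
  rcases h : avIDs.any (fun av => pyGet2 d av pid) with _ | _
  · -- RHS false: no item can hit
    simp only [List.any_eq_false] at h ⊢
    rintro ⟨k, v⟩ hmem
    simp only [Bool.and_eq_true, not_and]
    intro hk
    have hk' : k ∈ avIDs := by
      rw [← PySem.Set.mem_ofList]
      simpa [PySem.Set.contains] using hk
    have hget : (PySem.Dict.ofList d).getD k ([] : List (Int × Bool)) = v :=
      PySem.Dict.getD_of_mem_items _ hmem (PySem.Dict.nodup_keys_ofList d) _
    have hkk := h k hk'
    simp only [pyGet2, hget] at hkk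
    simp [hkk]
  · -- RHS true: some av ∈ avIDs hits; produce the corresponding item
    simp only [List.any_eq_true] at h ⊢
    obtain ⟨av, hav, hhit⟩ := h
    simp only [pyGet2] at hhit
    rcases hq : (PySem.Dict.ofList d).get? av with _ | v
    · exfalso
      have : (PySem.Dict.ofList d).getD av ([] : List (Int × Bool)) = [] :=
        PySem.Dict.getD_of_get?_eq_none _ _ hq
      rw [this] at hhit
      simp [PySem.Dict.ofList, PySem.Dict.getD, PySem.Dict.get?, PySem.Dict.update,
            PySem.Dict.empty] at hhit
    · refine ⟨(av, v), PySem.Dict.mem_items_of_get?_eq_some _ hq, ?_⟩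
      have hget : (PySem.Dict.ofList d).getD av ([] : List (Int × Bool)) = v :=
        PySem.Dict.getD_of_get?_eq_some _ _ hq
      rw [hget] at hhit
      simp [PySem.Set.contains, PySem.Set.mem_ofList, hhit, hav]

-- ===== VERDICT (by name: the statement is the Claim_ definition above) =====
theorem conflitante_spec : Claim_equal_conflitante := by
  intro avIDs pid hard soft _
  unfold Spec_conflitante conflitante conflitante_alt
  rw [conflitanteGo_eq, hitB_eq, hitB_eq]
  by_cases h1 : avIDs.any (fun av => pyGet2 hard av pid) <;>
    by_cases h2 : avIDs.any (fun av => pyGet2 soft av pid) <;> simp [h1, h2]
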